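-- pv_equiv track=rewrite | github.com/trezor/trezor-firmware | core/src/trezor/ui/layouts/tt/reset.py | _split_share_into_pages
-- ===== SOURCE A (Python) =====
-- from typing import Callable, Sequence
--
-- def _split_share_into_pages(share_words: Sequence[str], per_page: int = 4) -> list[str]:
--     pages: list[str] = []
--     current = ""
--     fill = 2
--
--     for i, word in enumerate(share_words):
--         if i % per_page == 0:
--             if i != 0:
--                 pages.append(current)
--             current = ""
--
--             # Align numbers to the right.
--             lastnum = i + per_page + 1
--             fill = 1 if lastnum < 10 else 2
--         else:
--             current += "\n"
--         current += f"{i + 1:>{fill}}. {word}"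
--
--     if current:
--         pages.append(current)
--
--     return pages
-- ===== SOURCE B (Python) =====
-- def _split_share_into_pages(share_words, per_page=4):
--     pages = []
--     for start in range(0, len(share_words), per_page):
--         chunk = share_words[start:start + per_page]
--         fill = 1 if start + per_page + 1 < 10 else 2
--         lines = [f"{start + j + 1:>{fill}}. {w}" for j, w in enumerate(chunk)]
--         pages.append("\n".join(lines))
--     return pages
-- ===== Notes on version B (the rewrite author's own statement) =====
-- stated objective: simpler
-- what changed: Replaced the flat index loop with running-string accumulator, modulo chunk-boundary branching and trailing flush by an outer loop over chunk starts (range with step per_page) that slices each chunk and joins its formatted lines.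
-- outside the precondition, e.g. on _split_share_into_pages(['a', 'b', 'c'], -2): A returns ['1. a\n2. b', '3. c'], B returns []; on _split_share_into_pages(['a'], 0): A raises ZeroDivisionError, B raises ValueError; on _split_share_into_pages([], 0): A returns [], B raises ValueError
import Mathlib
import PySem

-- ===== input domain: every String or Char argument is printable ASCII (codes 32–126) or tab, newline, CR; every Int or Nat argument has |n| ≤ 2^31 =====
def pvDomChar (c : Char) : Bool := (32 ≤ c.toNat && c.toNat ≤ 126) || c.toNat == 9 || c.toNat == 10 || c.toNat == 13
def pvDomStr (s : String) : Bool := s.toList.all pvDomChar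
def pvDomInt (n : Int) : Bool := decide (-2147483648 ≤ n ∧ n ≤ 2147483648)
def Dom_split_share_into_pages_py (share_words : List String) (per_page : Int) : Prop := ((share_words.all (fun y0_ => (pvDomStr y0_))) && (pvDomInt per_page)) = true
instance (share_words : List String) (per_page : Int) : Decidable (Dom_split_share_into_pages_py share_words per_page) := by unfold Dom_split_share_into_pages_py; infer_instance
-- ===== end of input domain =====

-- B replaces A's flat index loop (running string, modulo branch, trailing flush) by an
-- outer loop over chunk starts that slices each chunk and joins its formatted lines;
-- same return value on every input with per_page ≥ 1 (objective: simpler decomposition).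

-- ===== PORT A =====
-- f"{n:>{fill}}. {word}" (right-align n to width fill with spaces), on List Char
def pvFmtChars (fill : Int) (n : Int) (word : String) : List Char :=
  let ds := PySem.Int.toChars n
  List.replicate (fill.toNat - ds.length) ' ' ++ ds ++ '.' :: ' ' :: word.toList

-- one iteration of A's for-loop; state = (pages, current, fill), current kept as List Char
def pvAStep (per_page : Int) (st : List String × List Char × Int) (iw : Int × String) :
    List String × List Char × Int :=
  let pages := st.1; let current := st.2.1; let fill := st.2.2
  if PySem.Int.mod iw.1 per_page = 0 then
    let pages := if iw.1 ≠ 0 then pages ++ [String.ofList current] else pages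
    -- current = "" ; lastnum = i + per_page + 1 ; fill = 1 if lastnum < 10 else 2 ; current += fmt
    let fill := if iw.1 + per_page + 1 < 10 then (1 : Int) else 2
    (pages, pvFmtChars fill (iw.1 + 1) iw.2, fill)
  else
    (pages, current ++ '\n' :: pvFmtChars fill (iw.1 + 1) iw.2, fill)

-- trailing "if current: pages.append(current)"
def pvFinish (st : List String × List Char × Int) : List String :=
  if st.2.1 ≠ [] then st.1 ++ [String.ofList st.2.1] else st.1

def split_share_into_pages_py (share_words : List String) (per_page : Int) : List String :=
  pvFinish ((PySem.List.enumerate share_words 0).foldl (pvAStep per_page) ([], [], 2))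

-- ===== PORT B =====
-- one page: chunk = share_words[start:start+per_page]; "\n".join of its numbered lines
def pvPage (share_words : List String) (per_page : Int) (start : Int) : String :=
  let chunk := PySem.List.slice share_words (some start) (some (start + per_page))
  let fill : Int := if start + per_page + 1 < 10 then 1 else 2
  String.ofList (PySem.Chars.join ['\n']
    ((PySem.List.enumerate chunk 0).map (fun jw => pvFmtChars fill (start + jw.1 + 1) jw.2)))

def split_share_into_pages_py_alt (share_words : List String) (per_page : Int) : List String :=
  (PySem.List.pyRange 0 (share_words.length : Int) per_page).foldl
    (fun pages start => pages ++ [pvPage share_words per_page start]) []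

-- ===== PRECONDITION & SPEC =====
-- Pre_ excludes non-positive per_page (outside the function's natural domain): for
-- per_page == 0 A raises ZeroDivisionError (or, with no words at all, returns an empty list)
-- while B's range() raises ValueError; for negative per_page A's modulo test still
-- happens to paginate while B's range yields no chunks, so B returns an empty list.
def Pre_split_share_into_pages_py (share_words : List String) (per_page : Int) : Prop :=
  1 ≤ per_page
instance (share_words : List String) (per_page : Int) : Decidable (Pre_split_share_into_pages_py share_words per_page) := by unfold Pre_split_share_into_pages_py; infer_instance

def pvWitness_split_share_into_pages_py : List String × Int := (["alpha", "bravo", "charlie"], 2)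

def Spec_split_share_into_pages_py (share_words : List String) (per_page : Int) (out : List String) : Prop := out = split_share_into_pages_py_alt share_words per_page
instance (share_words : List String) (per_page : Int) (out : List String) : Decidable (Spec_split_share_into_pages_py share_words per_page out) := by unfold Spec_split_share_into_pages_py; infer_instance

-- ===== CLAIM (what is proved, stated in full; the proofs are below) =====
def Claim_equal_split_share_into_pages_py : Prop := ∀ (share_words : List String) (per_page : Int), Dom_split_share_into_pages_py share_words per_page → Pre_split_share_into_pages_py share_words per_page → Spec_split_share_into_pages_py share_words per_page (split_share_into_pages_py share_words per_page)

-- ===== LEMMAS AND PROOFS =====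

-- range cons for a positive step
theorem pvRange_nil {p : Int} (a b : Int) (hp : 0 < p) (hba : b ≤ a) :
    PySem.List.pyRange a b p = [] := by
  rw [PySem.List.pyRange_of_pos a b hp]
  simp [show ¬ a < b by omega]

theorem pvRange_cons {p : Int} (a b : Int) (hp : 0 < p) (hab : a < b) :
    PySem.List.pyRange a b p = a :: PySem.List.pyRange (a + p) b p := by
  rw [PySem.List.pyRange_of_pos a b hp, PySem.List.pyRange_of_pos (a + p) b hp]
  have hc : (b - a + p - 1) / p = (if a + p < b then (b - (a + p) + p - 1) / p else 0) + 1 := by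
    by_cases h2 : a + p < b
    · simp only [if_pos h2]
      have he : b - a + p - 1 = (b - (a + p) + p - 1) + 1 * p := by ring
      rw [he, Int.add_mul_ediv_right _ _ (by omega)]
    · simp only [if_neg h2]
      have h1 : (0:Int) ≤ b - a - 1 := by omega
      have h3 : b - a - 1 < p := by omega
      have he : b - a + p - 1 = (b - a - 1) + 1 * p := by ring
      rw [he, Int.add_mul_ediv_right _ _ (by omega), Int.ediv_eq_zero_of_lt h1 h3]
  have htn : ((if a + p < b then (b - (a + p) + p - 1) / p else 0) + 1).toNat
      = (if a + p < b then ((b - (a + p) + p - 1) / p).toNat else 0) + 1 := by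
    by_cases h2 : a + p < b
    · have : (0:Int) ≤ (b - (a + p) + p - 1) / p := Int.ediv_nonneg (by omega) (by omega)
      simp only [if_pos h2]; omega
    · simp [h2]
  rw [if_pos hab, hc, htn, List.range_succ_eq_map, List.map_cons]
  congr 1
  · simp
  · rw [List.map_map]
    apply List.map_congr_left
    intro k _
    simp only [Function.comp_apply]
    push_cast
    ring

-- shifting the start index of an enumerate under a map
theorem pvEnumShift {α β : Type} (c : List α) (i j : Int) (f : Int → α → β) :
    (PySem.List.enumerate c (i + j)).map (fun jw => f jw.1 jw.2) =
      (PySem.List.enumerate c j).map (fun jw => f (i + jw.1) jw.2) := by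
  induction c generalizing j with
  | nil => simp [PySem.List.enumerate_nil]
  | cons x xs ih =>
    simp only [PySem.List.enumerate_cons, List.map_cons]
    have := ih (j + 1)
    rw [show i + j + 1 = i + (j + 1) by ring, this]

-- "\n".join(l0 :: L) = l0 ++ concat of "\n"++line
theorem pvJoinEq (l0 : List Char) (L : List (List Char)) :
    PySem.Chars.join ['\n'] (l0 :: L) = l0 ++ (L.map (fun l => '\n' :: l)).flatten := by
  induction L generalizing l0 with
  | nil => simp [PySem.Chars.join_singleton]
  | cons m L ih =>
    rw [PySem.Chars.join_cons_cons, ih m]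
    simp

theorem pvFmt_ne_nil (fill n : Int) (w : String) : pvFmtChars fill n w ≠ [] := by
  simp [pvFmtChars]

-- A's inner loop over the non-boundary indices of a chunk only extends `current`
theorem pvInner (p : Int) (c : List String) (i : Int) (pages : List String)
    (current : List Char) (fill : Int)
    (hnd : ∀ k : Nat, k < c.length → ¬ (p ∣ (i + k))) :
    (PySem.List.enumerate c i).foldl (pvAStep p) (pages, current, fill) =
      (pages,
       current ++ ((PySem.List.enumerate c i).map
         (fun jw => '\n' :: pvFmtChars fill (jw.1 + 1) jw.2)).flatten,
       fill) := by
  induction c generalizing i current with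
  | nil => simp [PySem.List.enumerate_nil]
  | cons w rest ih =>
    have h0 : ¬ (p ∣ i) := by
      have := hnd 0 (by simp)
      simpa using this
    have hmod : ¬ PySem.Int.mod i p = 0 := by
      rw [PySem.Int.mod_eq_zero_iff_dvd]; exact h0
    simp only [PySem.List.enumerate_cons, List.foldl_cons, List.map_cons, List.flatten_cons]
    rw [show pvAStep p (pages, current, fill) (i, w) =
        (pages, current ++ '\n' :: pvFmtChars fill (i + 1) w, fill) by
      simp [pvAStep, hmod]]
    rw [ih (i + 1) _ (by
      intro k hk
      have hk1 := hnd (k + 1) (by simpa using Nat.succ_lt_succ hk)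
      intro hd
      refine hk1 ?_
      have he : i + ((k + 1 : Nat) : Int) = i + 1 + (k : Int) := by push_cast; ring
      rw [he]; exact hd)]
    simp

-- the page B builds at chunk start s, written as A builds it
theorem pvPageEq (full : List String) (p : Int) (s : Nat) (hp : 1 ≤ p)
    (w : String) (rest : List String) (h : full.drop s = w :: rest) :
    pvPage full p (s : Int) =
      String.ofList
        (pvFmtChars (if (s : Int) + p + 1 < 10 then 1 else 2) ((s : Int) + 1) w ++
          ((PySem.List.enumerate (rest.take (p - 1).toNat) ((s : Int) + 1)).map
            (fun jw => '\n' :: pvFmtChars (if (s : Int) + p + 1 < 10 then 1 else 2) (jw.1 + 1) jw.2)).flatten) := by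
  have hsp : ((s : Int) + p) = ((s : Int) + ((p.toNat : Nat) : Int)) := by omega
  have hq1 : p.toNat = (p - 1).toNat + 1 := by omega
  unfold pvPage
  rw [hsp, PySem.List.slice_natCast_add full s p.toNat, h, hq1, List.take_succ_cons]
  simp only [PySem.List.enumerate_cons, List.map_cons]
  rw [show ((((p - 1).toNat + 1 : Nat)) : Int) = p from by omega]
  rw [pvJoinEq]
  have hsh := pvEnumShift (rest.take ((p - 1).toNat)) (s : Int) 1
    (fun a x => '\n' :: pvFmtChars (if (s : Int) + p + 1 < 10 then 1 else 2) (a + 1) x)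
  congr 1
  rw [List.map_map, hsh]
  norm_num [Function.comp]
  rfl

-- main invariant: base case, the loop is past the end of the list
theorem pvMainNil (p : Int) (hp : 1 ≤ p) (full : List String) (s : Nat) (pages : List String)
    (current : List Char) (fill : Int) (h0 : s = 0 → current = []) (hne : s ≠ 0 → current ≠ [])
    (hnil : full.drop s = []) :
    pvFinish ((PySem.List.enumerate (full.drop s) (s : Int)).foldl (pvAStep p) (pages, current, fill)) =
      (if s = 0 then pages else pages ++ [String.ofList current]) ++
        (PySem.List.pyRange (s : Int) (full.length : Int) p).map (pvPage full p) := by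
  have hsl : full.length ≤ s := List.drop_eq_nil_iff.mp hnil
  rw [hnil, pvRange_nil _ _ (by omega) (by exact_mod_cast hsl)]
  by_cases hs : s = 0
  · simp [hs, h0 hs, PySem.List.enumerate_nil, pvFinish]
  · simp [hs, hne hs, PySem.List.enumerate_nil, pvFinish]

-- main invariant: from any chunk boundary s, finishing A's loop appends exactly B's pages
theorem pvMain (p : Int) (hp : 1 ≤ p) (full : List String) :
    ∀ (fuel s : Nat) (pages : List String) (current : List Char) (fill : Int),
      (p ∣ (s : Int)) → (s = 0 → current = []) → (s ≠ 0 → current ≠ []) →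
      (full.drop s).length ≤ fuel →
      pvFinish ((PySem.List.enumerate (full.drop s) (s : Int)).foldl (pvAStep p) (pages, current, fill)) =
        (if s = 0 then pages else pages ++ [String.ofList current]) ++
          (PySem.List.pyRange (s : Int) (full.length : Int) p).map (pvPage full p) := by
  intro fuel
  induction fuel with
  | zero =>
    intro s pages current fill _ h0 hne hlen
    exact pvMainNil p hp full s pages current fill h0 hne (by
      cases h : full.drop s with
      | nil => rfl
      | cons a l => rw [h] at hlen; simp at hlen)
  | succ fuel ih =>
    intro s pages current fill hdvd h0 hne hlen
    rcases hd : full.drop s with _ | ⟨w, rest⟩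
    · have hb := pvMainNil p hp full s pages current fill h0 hne hd
      rw [hd] at hb
      exact hb
    · have hfl : (full.drop s).length = full.length - s := by simp
      rw [hd] at hfl
      have hslen : s < full.length := by simp at hfl; omega
      have hql : ((p - 1).toNat : Int) = p - 1 := by omega
      have hmod0 : PySem.Int.mod (s : Int) p = 0 := (PySem.Int.mod_eq_zero_iff_dvd _ _).mpr hdvd
      rw [PySem.List.enumerate_cons, List.foldl_cons]
      have hstep : pvAStep p (pages, current, fill) ((s : Int), w) =
          ((if s = 0 then pages else pages ++ [String.ofList current]),
           pvFmtChars (if (s : Int) + p + 1 < 10 then 1 else 2) ((s : Int) + 1) w,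
           (if (s : Int) + p + 1 < 10 then 1 else 2)) := by
        by_cases hs : s = 0
        · subst hs
          simp only [Nat.cast_zero] at hmod0 ⊢
          simp [pvAStep, hmod0]
        · have hsz : ((s : Int)) ≠ 0 := by exact_mod_cast Nat.cast_ne_zero.mpr hs
          simp [pvAStep, hmod0]
      rw [hstep]
      rw [show PySem.List.enumerate rest ((s : Int) + 1) =
            PySem.List.enumerate (rest.take (p - 1).toNat ++ rest.drop (p - 1).toNat) ((s : Int) + 1) from by
          rw [List.take_append_drop]]
      rw [PySem.List.enumerate_append, List.foldl_append]
      have hdvdfacts : ∀ k : Nat, k < (rest.take (p - 1).toNat).length → ¬ (p ∣ ((s : Int) + 1 + k)) := by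
        intro k hk hdk
        have hkq : k < (p - 1).toNat := lt_of_lt_of_le hk (by simp [List.length_take])
        have h1k : p ∣ ((1 : Int) + k) := by
          have he : ((s : Int) + 1 + k) - s = 1 + k := by ring
          rw [← he]; exact dvd_sub hdk hdvd
        have hle : p ≤ 1 + k := Int.le_of_dvd (by positivity) h1k
        have hkq' : (k : Int) < ((p - 1).toNat : Int) := by exact_mod_cast hkq
        omega
      rw [pvInner p (rest.take (p - 1).toNat) _ _ _ _ hdvdfacts]
      have hcur2ne : pvFmtChars (if (s : Int) + p + 1 < 10 then 1 else 2) ((s : Int) + 1) w ++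
          ((PySem.List.enumerate (rest.take (p - 1).toNat) ((s : Int) + 1)).map
            (fun jw => '\n' :: pvFmtChars (if (s : Int) + p + 1 < 10 then 1 else 2) (jw.1 + 1) jw.2)).flatten ≠ [] :=
        fun hc => pvFmt_ne_nil _ _ _ (List.append_eq_nil_iff.mp hc).1
      have hdrop2 : full.drop (s + p.toNat) = rest.drop (p - 1).toNat := by
        have h1 : full.drop (s + p.toNat) = (full.drop s).drop p.toNat := by
          rw [List.drop_drop]
        rw [h1, hd, show p.toNat = (p - 1).toNat + 1 from by omega, List.drop_succ_cons]
      by_cases hq : (p - 1).toNat ≤ rest.length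
      · have hlt : (rest.take (p - 1).toNat).length = (p - 1).toNat := by
          rw [List.length_take]; exact Nat.min_eq_left hq
        rw [hlt]
        rw [show ((s : Int) + 1 + ((p - 1).toNat : Int)) = ((s + p.toNat : Nat) : Int) from by push_cast; omega]
        rw [← hdrop2]
        rw [ih (s + p.toNat) _ _ _
          (by rw [show ((s + p.toNat : Nat) : Int) = (s : Int) + p from by push_cast; omega]
              exact dvd_add hdvd dvd_rfl)
          (fun hc => absurd hc (by omega))
          (fun _ => hcur2ne)
          (by
            have h5 : (List.drop (s + p.toNat) full).length = full.length - (s + p.toNat) := by simp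
            have h6 : rest.length + 1 = full.length - s := by simpa using hfl
            have h7 : (List.drop s full).length ≤ fuel + 1 := hlen
            rw [hd] at h7
            simp at h7
            omega)]
        rw [if_neg (show ¬ s + p.toNat = 0 by omega)]
        rw [pvRange_cons (s : Int) (full.length : Int) (by omega) (by exact_mod_cast hslen)]
        rw [List.map_cons]
        rw [pvPageEq full p s hp w rest hd]
        rw [show ((s : Int) + p) = ((s + p.toNat : Nat) : Int) from by push_cast; omega]
        simp [List.append_assoc]
      · have hdr : rest.drop (p - 1).toNat = [] := List.drop_eq_nil_of_le (by omega)
        rw [hdr, PySem.List.enumerate_nil, List.foldl_nil]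
        rw [pvRange_cons (s : Int) (full.length : Int) (by omega) (by exact_mod_cast hslen)]
        rw [pvRange_nil ((s : Int) + p) (full.length : Int) (by omega)
          (by simp at hfl; omega)]
        rw [List.map_cons, List.map_nil]
        rw [pvPageEq full p s hp w rest hd]
        simp only [pvFinish]
        rw [if_pos hcur2ne]

-- ===== VERDICT (by name: the statement is the Claim_ definition above) =====
theorem split_share_into_pages_py_spec : Claim_equal_split_share_into_pages_py := by
  intro ws p _ hpre
  unfold Spec_split_share_into_pages_py split_share_into_pages_py split_share_into_pages_py_alt
  rw [PySem.List.foldl_append_singleton_eq_map]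
  have hm := pvMain p hpre ws ws.length 0 [] [] 2 (by simp) (fun _ => rfl)
    (fun h => absurd rfl h) (by simp)
  simpa using hm
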